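-- pv_equiv track=rewrite | github.com/jkfer/Codewars | Smallest_possible_sum.py | solution
-- ===== SOURCE A (Python) =====
-- def solution(a):
--     if len(a) == 1:
--         return a[0]
--
--     while len(set(a)) > 1:
--         a.sort(reverse=True, key=int)
--         i = a.count(a[0]) - 1
--         #while a[i] == a[i+1] and i < len(a) - 1:
--         #    i += 1
--
--         if a[i] % a[i+1] == 0:
--             a[i] -= a[i+1]
--         elif a[i] % a[i+1] > 0:
--             a[i] %= a[i+1]
--
--     return sum(a)
-- ===== SOURCE B (Python) =====
-- # Closed form: the reduction preserves the multiset gcd, so the smallest sum is len(a) * gcd(a).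
-- def _gcd(x, y):
--     while y:
--         x, y = y, x % y
--     return x
--
--
-- def solution(a):
--     if len(a) == 1:
--         return a[0]
--     g = 0
--     for x in a:
--         g = _gcd(g, x)
--     return len(a) * g
-- ===== Notes on version B (the rewrite author's own statement) =====
-- stated objective: simpler
-- what changed: A repeatedly sorts the list and subtracts/reduces the largest element until all elements are equal; B computes the same answer in one pass as len(a) times the gcd of the elements, since each reduction step preserves the gcd.
import Mathlib
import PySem

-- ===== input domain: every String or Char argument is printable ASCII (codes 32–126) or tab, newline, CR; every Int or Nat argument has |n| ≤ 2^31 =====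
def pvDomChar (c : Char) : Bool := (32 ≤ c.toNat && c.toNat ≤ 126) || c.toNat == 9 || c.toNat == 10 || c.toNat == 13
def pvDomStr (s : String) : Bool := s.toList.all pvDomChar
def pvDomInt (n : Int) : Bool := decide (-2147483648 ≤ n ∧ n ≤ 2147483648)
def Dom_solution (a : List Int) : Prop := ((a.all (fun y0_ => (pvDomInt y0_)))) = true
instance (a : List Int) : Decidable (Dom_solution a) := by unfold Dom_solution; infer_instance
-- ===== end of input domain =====

-- B replaces A's repeated sort-and-reduce loop by the closed form len(a) * gcd(a) (each reduction step
-- preserves the gcd of the list), computed in one pass.  A sorts its argument in place (a mutation the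
-- caller could observe); the equivalence proved here is about the RETURN value only.

-- ===== PORT A =====
-- One iteration of A's while-loop body: sort descending, then reduce the last copy of the maximum
-- by the next element (subtract it if it divides, else replace by the remainder).
def stepA (a : List Int) : List Int :=
  let s := PySem.List.sorted a (fun z => z) true
  let i : Nat := s.count ((PySem.List.pyGet? s 0).getD 0) - 1
  let xi := (PySem.List.pyGet? s (i : Int)).getD 0
  let y := (PySem.List.pyGet? s ((i : Int) + 1)).getD 0
  if PySem.Int.mod xi y = 0 then PySem.List.pySetD s (i : Int) (xi - y)
  else if 0 < PySem.Int.mod xi y then PySem.List.pySetD s (i : Int) (PySem.Int.mod xi y)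
  else s

-- A's 'while len(set(a)) > 1' loop.  The fuel argument is a totality guard only: inside Pre_solution
-- each iteration strictly decreases the (nonnegative) sum, so fuel 'sum + 1' is never exhausted.
def loopA (fuel : Nat) (a : List Int) : List Int :=
  match fuel with
  | 0 => a
  | f + 1 => if 1 < (PySem.Set.ofList a).length then loopA f (stepA a) else a

def solution (a : List Int) : Int :=
  if a.length = 1 then (PySem.List.pyGet? a 0).getD 0
  else (loopA (a.sum.toNat + 1) a).sum

-- ===== PORT B =====
-- Termination of the hand-written Euclid loop in Source B: |x % y| < |y| when y ≠ 0.
theorem pyMod_natAbs_lt (x y : Int) (hy : ¬ y = 0) : (PySem.Int.mod x y).natAbs < y.natAbs := by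
  rcases lt_or_gt_of_ne hy with h | h
  · have h1 := PySem.Int.mod_neg_bounds x h
    omega
  · have h1 := PySem.Int.mod_nonneg x h
    have h2 := PySem.Int.mod_lt x h
    omega

-- Source B's _gcd: 'while y: x, y = y, x % y'.
def gcdAux (x y : Int) : Int :=
  if h : y = 0 then x
  else gcdAux y (PySem.Int.mod x y)
termination_by y.natAbs
decreasing_by exact pyMod_natAbs_lt x y h

def solution_alt (a : List Int) : Int :=
  if a.length = 1 then (PySem.List.pyGet? a 0).getD 0
  else a.length * a.foldl (fun g x => gcdAux g x) 0

-- ===== PRECONDITION & SPEC =====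
-- Pre_ excludes multi-element non-constant lists containing a nonpositive element: on those A never
-- returns (it raises ZeroDivisionError when the element after the maximum block is 0, and its
-- reduction loop never terminates on mixed negative values).
def Pre_solution (a : List Int) : Prop :=
  a.length ≤ 1 ∨ (∀ x ∈ a, 0 < x) ∨ (∀ x ∈ a, x = a.headD 0)
instance (a : List Int) : Decidable (Pre_solution a) := by unfold Pre_solution; infer_instance
def pvWitness_solution : List Int := [6, 10, 15]
def Spec_solution (a : List Int) (out : Int) : Prop := out = solution_alt a
instance (a : List Int) (out : Int) : Decidable (Spec_solution a out) := by unfold Spec_solution; infer_instance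

-- ===== CLAIM (what is proved, stated in full; the proofs are below) =====
def Claim_equal_solution : Prop := ∀ (a : List Int), Dom_solution a → Pre_solution a → Spec_solution a (solution a)

-- ===== LEMMAS AND PROOFS =====

-- The gcd of a list as a multiset (the permutation-invariant invariant of A's reduction loop).
def G (l : List Int) : Int := (↑l : Multiset Int).gcd

theorem G_nil : G [] = 0 := by simp [G]

theorem G_cons (x : Int) (l : List Int) : G (x :: l) = GCDMonoid.gcd x (G l) := by
  show ((↑(x :: l) : Multiset Int)).gcd = _
  rw [← Multiset.cons_coe, Multiset.gcd_cons]; rfl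

theorem G_perm {l₁ l₂ : List Int} (h : l₁.Perm l₂) : G l₁ = G l₂ := by
  unfold G
  rw [Multiset.coe_eq_coe.mpr h]

theorem G_nonneg (l : List Int) : 0 ≤ G l := by
  induction l with
  | nil => simp [G_nil]
  | cons x t ih => rw [G_cons]; exact Int.gcd_nonneg x (G t)

-- gcd is invariant under subtracting a multiple of the other argument.
theorem int_gcd_sub_mul (x y q : Int) : Int.gcd (x - q * y) y = Int.gcd x y := by
  apply Nat.dvd_antisymm
  · apply Int.dvd_gcd
    · have h1 := Int.gcd_dvd_left (x - q * y) y
      have h2 := Int.gcd_dvd_right (x - q * y) y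
      have h3 : (↑((x - q * y).gcd y) : Int) ∣ (x - q * y) + q * y :=
        dvd_add h1 (Dvd.dvd.mul_left h2 q)
      simpa using h3
    · exact Int.gcd_dvd_right (x - q * y) y
  · apply Int.dvd_gcd
    · exact dvd_sub (Int.gcd_dvd_left x y) (Dvd.dvd.mul_left (Int.gcd_dvd_right x y) q)
    · exact Int.gcd_dvd_right x y

theorem int_gcd_pyMod (x y : Int) : Int.gcd (PySem.Int.mod x y) y = Int.gcd x y := by
  have h := PySem.Int.floordiv_mul_add_mod x y
  have hm : PySem.Int.mod x y = x - (PySem.Int.floordiv x y) * y := by omega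
  rw [hm]; exact int_gcd_sub_mul x y (PySem.Int.floordiv x y)

theorem pyMod_zero_left (y : Int) : PySem.Int.mod 0 y = 0 :=
  (PySem.Int.mod_eq_zero_iff_dvd 0 y).mpr (dvd_zero y)

theorem pyMod_self (v : Int) : PySem.Int.mod v v = 0 :=
  (PySem.Int.mod_eq_zero_iff_dvd v v).mpr dvd_rfl

theorem gcdAux_zero_right (x : Int) : gcdAux x 0 = x := by
  unfold gcdAux; simp

theorem gcdAux_zero_left (v : Int) : gcdAux 0 v = v := by
  by_cases hv : v = 0
  · subst hv; exact gcdAux_zero_right 0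
  · rw [gcdAux, dif_neg hv, pyMod_zero_left, gcdAux_zero_right]

theorem gcdAux_self (v : Int) : gcdAux v v = v := by
  by_cases hv : v = 0
  · subst hv; exact gcdAux_zero_right 0
  · rw [gcdAux, dif_neg hv, pyMod_self, gcdAux_zero_right]

theorem gcdAux_eq_gcd : ∀ (n : Nat) (x y : Int), y.natAbs ≤ n → 0 ≤ x → 0 ≤ y →
    gcdAux x y = ↑(Int.gcd x y) := by
  intro n
  induction n with
  | zero =>
    intro x y hn hx hy
    have hy0 : y = 0 := by omega
    subst hy0
    rw [gcdAux_zero_right, Int.gcd_zero_right, Int.natAbs_of_nonneg hx]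
  | succ n ih =>
    intro x y hn hx hy
    by_cases hy0 : y = 0
    · subst hy0
      rw [gcdAux_zero_right, Int.gcd_zero_right, Int.natAbs_of_nonneg hx]
    · have hypos : 0 < y := lt_of_le_of_ne hy (Ne.symm hy0)
      rw [gcdAux, dif_neg hy0]
      have hmlt := pyMod_natAbs_lt x y hy0
      have hmn : (PySem.Int.mod x y).natAbs ≤ n := by omega
      rw [ih y (PySem.Int.mod x y) hmn hy (PySem.Int.mod_nonneg x hypos)]
      rw [Int.gcd_comm y (PySem.Int.mod x y), int_gcd_pyMod x y]

-- Folding gcdAux over a list of nonnegatives computes the multiset gcd.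
theorem foldl_gcdAux_eq (l : List Int) : ∀ g : Int, 0 ≤ g → (∀ x ∈ l, 0 ≤ x) →
    l.foldl (fun g x => gcdAux g x) g = GCDMonoid.gcd g (G l) := by
  induction l with
  | nil =>
    intro g hg _
    simp only [List.foldl_nil, G_nil]
    rw [gcd_zero_right, Int.normalize_of_nonneg hg]
  | cons x t ih =>
    intro g hg hl
    have hx : 0 ≤ x := hl x List.mem_cons_self
    have hgx : gcdAux g x = GCDMonoid.gcd g x := by
      rw [gcdAux_eq_gcd x.natAbs g x le_rfl hg hx]; exact Int.coe_gcd g x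
    simp only [List.foldl_cons]
    rw [ih (gcdAux g x) (by rw [hgx]; exact Int.gcd_nonneg g x)
      (fun z hz => hl z (List.mem_cons_of_mem x hz))]
    rw [hgx, G_cons, gcd_assoc]

theorem foldl_gcdAux_replicate (v : Int) : ∀ n : Nat,
    (List.replicate n v).foldl (fun g x => gcdAux g x) v = v := by
  intro n
  induction n with
  | zero => rfl
  | succ n ih => simpa [List.replicate_succ, gcdAux_self] using ih

theorem G_replicate_pos {v : Int} (hv : 0 < v) : ∀ n : Nat, G (List.replicate (n + 1) v) = v := by
  intro n
  induction n with
  | zero =>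
    simp only [List.replicate_succ, List.replicate_zero, G_cons, G_nil]
    rw [gcd_zero_right, Int.normalize_of_nonneg hv.le]
  | succ n ih =>
    rw [List.replicate_succ, G_cons, ih, gcd_same, Int.normalize_of_nonneg hv.le]

theorem sum_replicate_int (n : Nat) (v : Int) : (List.replicate n v).sum = n * v := by
  induction n with
  | zero => simp
  | succ n ih => rw [List.replicate_succ, List.sum_cons, ih]; push_cast; ring

theorem length_le_sum : ∀ (a : List Int), (∀ x ∈ a, 0 < x) → (a.length : Int) ≤ a.sum := by
  intro a
  induction a with
  | nil => simp
  | cons x t ih =>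
    intro h
    have hx := h x List.mem_cons_self
    have ht := ih (fun z hz => h z (List.mem_cons_of_mem x hz))
    simp only [List.length_cons, List.sum_cons]
    push_cast
    omega

theorem two_mem_ne_length {l : List Int} {x y : Int} (hx : x ∈ l) (hy : y ∈ l) (hne : x ≠ y) :
    1 < l.length := by
  match l with
  | [] => exact absurd hx List.not_mem_nil
  | [a] =>
    rw [List.mem_singleton] at hx hy
    exact absurd (hx.trans hy.symm) hne
  | a :: b :: t =>
    simp only [List.length_cons]
    omega

theorem all_eq_of_not_distinct {a : List Int} (h : ¬ 1 < (PySem.Set.ofList a).length) :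
    ∀ x ∈ a, ∀ y ∈ a, x = y := by
  intro x hx y hy
  by_contra hne
  exact h (two_mem_ne_length ((PySem.Set.mem_ofList a x).mpr hx)
    ((PySem.Set.mem_ofList a y).mpr hy) hne)

theorem exists_two_distinct {a : List Int} (h : 1 < (PySem.Set.ofList a).length) :
    ∃ u ∈ a, ∃ v ∈ a, u ≠ v := by
  have hnd := PySem.Set.nodup_ofList a
  match hS : PySem.Set.ofList a with
  | [] => rw [hS] at h; simp at h
  | [u] => rw [hS] at h; simp at h
  | u :: v :: S' =>
    rw [hS] at hnd
    have hne : u ≠ v := by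
      have h1 := (List.nodup_cons.mp hnd).1
      intro he; exact h1 (he ▸ List.mem_cons_self)
    have hu : u ∈ a := by
      have := (PySem.Set.mem_ofList a u).mp
      rw [hS] at this
      exact this List.mem_cons_self
    have hv : v ∈ a := by
      have := (PySem.Set.mem_ofList a v).mp
      rw [hS] at this
      exact this (List.mem_cons_of_mem u List.mem_cons_self)
    exact ⟨u, hu, v, hv, hne⟩

-- In a descending list with head x, the occurrences of x form the prefix of length (count x).
theorem desc_split : ∀ (s : List Int), s.Pairwise (fun p q => q ≤ p) →
    ∀ x, s.head? = some x →
    ∃ r, s = List.replicate (s.count x) x ++ r ∧ ∀ z ∈ r, z < x := by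
  intro s
  induction s with
  | nil => intro _ x hx; simp at hx
  | cons w t ih =>
    intro hp x hx
    have hw : w = x := by simpa using hx
    subst hw
    have h1 : ∀ z ∈ t, z ≤ w := (List.pairwise_cons.mp hp).1
    have h2 : t.Pairwise (fun p q => q ≤ p) := (List.pairwise_cons.mp hp).2
    match t, h1, h2, ih with
    | [], _, _, _ => exact ⟨[], by simp, by simp⟩
    | z :: t', h1, h2, ih =>
      by_cases hzw : z = w
      · subst hzw
        obtain ⟨r, hr, hrlt⟩ := ih h2 z rfl
        refine ⟨r, ?_, hrlt⟩
        rw [List.count_cons_self, List.replicate_succ]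
        simp only [List.cons_append]
        rw [← hr]
      · have hznotw : z ≠ w := hzw
        have hcz : (z :: t').count w = 0 := by
          rw [List.count_eq_zero]
          intro hmem
          rcases List.mem_cons.mp hmem with he | hmem'
          · exact hznotw he.symm
          · have hwz : w ≤ z := (List.pairwise_cons.mp h2).1 w hmem'
            have hzw' : z ≤ w := h1 z List.mem_cons_self
            exact hznotw (le_antisymm hzw' hwz)
        refine ⟨z :: t', ?_, ?_⟩
        · rw [List.count_cons_self, hcz]
          simp
        · intro u hu
          rcases List.mem_cons.mp hu with he | hmem'
          · subst he
            exact lt_of_le_of_ne (h1 u List.mem_cons_self) hznotw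
          · have huz : u ≤ z := (List.pairwise_cons.mp h2).1 u hmem'
            have hzltw : z < w := lt_of_le_of_ne (h1 z List.mem_cons_self) hznotw
            exact lt_of_le_of_lt huz hzltw

theorem replicate_append_getElem?_lt :
    ∀ (c i : Nat), i < c → ∀ (x : Int) (r : List Int), (List.replicate c x ++ r)[i]? = some x := by
  intro c
  induction c with
  | zero => intro i h; omega
  | succ c ih =>
    intro i h x r
    match i with
    | 0 => simp [List.replicate_succ]
    | i + 1 =>
      rw [List.replicate_succ]
      simp only [List.cons_append, List.getElem?_cons_succ]
      exact ih i (by omega) x r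

theorem replicate_append_getElem?_self :
    ∀ (c : Nat) (x : Int) (r : List Int), (List.replicate c x ++ r)[c]? = r[0]? := by
  intro c
  induction c with
  | zero => simp
  | succ c ih =>
    intro x r
    rw [List.replicate_succ]
    simp only [List.cons_append, List.getElem?_cons_succ]
    exact ih x r

theorem replicate_append_set :
    ∀ (c : Nat), c ≠ 0 → ∀ (x v : Int) (r : List Int),
      (List.replicate c x ++ r).set (c - 1) v = List.replicate (c - 1) x ++ v :: r := by
  intro c
  induction c with
  | zero => intro h; omega
  | succ c ih =>
    intro _ x v r
    match c, ih with
    | 0, _ => simp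
    | c + 1, ih =>
      have h1 : c + 1 + 1 - 1 = (c + 1 - 1) + 1 := by omega
      rw [List.replicate_succ, List.cons_append, h1, List.set_cons_succ, ih (by omega) x v r,
        List.replicate_succ, List.cons_append]

-- One step of A's loop on a positive non-constant list: it replaces one element x by a smaller
-- positive x' with the same gcd against a fixed witness y, leaving the rest untouched.
theorem stepA_char (a : List Int) (hpos : ∀ z ∈ a, 0 < z) (hc : 1 < (PySem.Set.ofList a).length) :
    ∃ x y x' m, a.Perm (x :: y :: m) ∧ (stepA a).Perm (x' :: y :: m) ∧
      0 < x' ∧ x' < x ∧ 0 < y ∧ Int.gcd x' y = Int.gcd x y := by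
  obtain ⟨u, hu, v, hv, huv⟩ := exists_two_distinct hc
  have hne : PySem.List.sorted a (fun z => z) true ≠ [] := by
    intro h
    rw [PySem.List.sorted_eq_nil_iff] at h
    rw [h] at hu
    exact absurd hu List.not_mem_nil
  obtain ⟨x, t, hst⟩ : ∃ x t, PySem.List.sorted a (fun z => z) true = x :: t := by
    match h : PySem.List.sorted a (fun z => z) true with
    | [] => exact absurd h hne
    | x :: t => exact ⟨x, t, rfl⟩
  have hperm : (x :: t).Perm a := by
    rw [← hst]; exact PySem.List.sorted_perm a (fun z => z) true
  have hpair : (x :: t).Pairwise (fun p q => q ≤ p) := by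
    rw [← hst]; exact PySem.List.sorted_pairwise_rev a (fun z => z)
  obtain ⟨r, hsplit, hrlt⟩ := desc_split (x :: t) hpair x rfl
  obtain ⟨c, hcdef⟩ : ∃ c, (x :: t).count x = c := ⟨_, rfl⟩
  rw [hcdef] at hsplit
  have hc1 : 1 ≤ c := by
    rcases Nat.eq_zero_or_pos c with h0 | h
    · rw [h0] at hsplit
      simp only [List.replicate_zero, List.nil_append] at hsplit
      have hxr : x ∈ r := by rw [← hsplit]; exact List.mem_cons_self
      exact absurd (hrlt x hxr) (lt_irrefl x)
    · exact h
  have hrne : r ≠ [] := by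
    intro h
    rw [h, List.append_nil] at hsplit
    have hus : u ∈ (x :: t) := hperm.mem_iff.mpr hu
    have hvs : v ∈ (x :: t) := hperm.mem_iff.mpr hv
    rw [hsplit] at hus hvs
    exact huv ((List.eq_of_mem_replicate hus).trans (List.eq_of_mem_replicate hvs).symm)
  obtain ⟨y, r', rfl⟩ : ∃ y r', r = y :: r' := by
    match r, hrne with
    | [], hrne => exact absurd rfl hrne
    | y :: r', _ => exact ⟨y, r', rfl⟩
  have hylt : y < x := hrlt y List.mem_cons_self
  have hya : y ∈ a := hperm.mem_iff.mp
    (by rw [hsplit]; exact List.mem_append_right _ List.mem_cons_self)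
  have hxa : x ∈ a := hperm.mem_iff.mp List.mem_cons_self
  have hy0 : 0 < y := hpos y hya
  have hx0 : 0 < x := hpos x hxa
  -- evaluate the port's index computations on sorted(a) = replicate c x ++ y :: r'
  have e0 : (PySem.List.pyGet? (x :: t) 0).getD 0 = x := by
    rw [PySem.List.pyGet?_zero]; rfl
  have e1 : (PySem.List.pyGet? (x :: t) ((c - 1 : Nat) : Int)).getD 0 = x := by
    rw [PySem.List.pyGet?_natCast, hsplit, replicate_append_getElem?_lt c (c - 1) (by omega)]
    rfl
  have e2 : (PySem.List.pyGet? (x :: t) (((c - 1 : Nat) : Int) + 1)).getD 0 = y := by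
    have hcast : ((c - 1 : Nat) : Int) + 1 = ((c : Nat) : Int) := by omega
    rw [hcast, PySem.List.pyGet?_natCast, hsplit, replicate_append_getElem?_self]
    rfl
  have e3 : ∀ w, PySem.List.pySetD (x :: t) ((c - 1 : Nat) : Int) w
      = List.replicate (c - 1) x ++ w :: y :: r' := by
    intro w
    rw [PySem.List.pySetD_natCast, hsplit, replicate_append_set c (by omega)]
  have hstep : stepA a =
      (if PySem.Int.mod x y = 0 then List.replicate (c - 1) x ++ (x - y) :: y :: r'
       else if 0 < PySem.Int.mod x y then
         List.replicate (c - 1) x ++ (PySem.Int.mod x y) :: y :: r'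
       else (x :: t)) := by
    simp only [stepA, hst, e0, hcdef, e1, e2, e3]
  have hrepl : List.replicate c x = x :: List.replicate (c - 1) x := by
    conv_lhs => rw [show c = (c - 1) + 1 from by omega]
    rw [List.replicate_succ]
  have h1 : (x :: t) = x :: (List.replicate (c - 1) x ++ y :: r') := by
    rw [hsplit, hrepl, List.cons_append]
  have haperm : a.Perm (x :: y :: (List.replicate (c - 1) x ++ r')) :=
    hperm.symm.trans (by rw [h1]; exact List.Perm.cons x List.perm_middle)
  have hnewperm : ∀ w : Int, (List.replicate (c - 1) x ++ w :: y :: r').Perm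
      (w :: y :: (List.replicate (c - 1) x ++ r')) :=
    fun w => List.Perm.trans List.perm_middle (List.Perm.cons w List.perm_middle)
  by_cases hdvd : PySem.Int.mod x y = 0
  · refine ⟨x, y, x - y, List.replicate (c - 1) x ++ r', haperm, ?_, by omega, by omega, hy0, ?_⟩
    · rw [hstep, if_pos hdvd]
      exact hnewperm (x - y)
    · have hgs := int_gcd_sub_mul x y 1
      rw [one_mul] at hgs
      exact hgs
  · have hmpos : 0 < PySem.Int.mod x y :=
      lt_of_le_of_ne (PySem.Int.mod_nonneg x hy0) (Ne.symm hdvd)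
    have hmlty : PySem.Int.mod x y < y := PySem.Int.mod_lt x hy0
    refine ⟨x, y, PySem.Int.mod x y, List.replicate (c - 1) x ++ r', haperm, ?_, hmpos,
      by omega, hy0, int_gcd_pyMod x y⟩
    rw [hstep, if_neg hdvd, if_pos hmpos]
    exact hnewperm (PySem.Int.mod x y)

-- Main loop invariant: with fuel at least the sum, A's loop drives a positive list to sum
-- length * gcd.
theorem loopA_spec : ∀ (f : Nat) (a : List Int), (∀ x ∈ a, 0 < x) → a.sum ≤ (f : Int) →
    (loopA f a).sum = a.length * G a := by
  intro f
  induction f with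
  | zero =>
    intro a hpos hsum
    have hlen := length_le_sum a hpos
    have h0 : a.length = 0 := by omega
    rw [List.length_eq_zero_iff.mp h0]
    simp [loopA, G_nil]
  | succ f ih =>
    intro a hpos hsum
    show (if 1 < (PySem.Set.ofList a).length then loopA f (stepA a) else a).sum = _
    by_cases hc : 1 < (PySem.Set.ofList a).length
    · rw [if_pos hc]
      obtain ⟨x, y, x', m, hap, hsp, hx'0, hx'lt, hy0, hg⟩ := stepA_char a hpos hc
      have hpos' : ∀ z ∈ stepA a, 0 < z := by
        intro z hz
        rcases List.mem_cons.mp (hsp.mem_iff.mp hz) with he | hz2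
        · rw [he]; exact hx'0
        · exact hpos z (hap.mem_iff.mpr (List.mem_cons_of_mem x hz2))
      have hsums : (stepA a).sum = x' + (y :: m).sum := by
        rw [hsp.sum_eq, List.sum_cons]
      have hsuma : a.sum = x + (y :: m).sum := by
        rw [hap.sum_eq, List.sum_cons]
      have hsum' : (stepA a).sum ≤ (f : Int) := by
        push_cast at hsum
        omega
      have hG : G (stepA a) = G a := by
        rw [G_perm hsp, G_perm hap, G_cons, G_cons, G_cons, G_cons, ← gcd_assoc, ← gcd_assoc]
        congr 1
        rw [← Int.coe_gcd, ← Int.coe_gcd, hg]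
      have hlen : (stepA a).length = a.length := by
        rw [hsp.length_eq, hap.length_eq]
        simp
      rw [ih (stepA a) hpos' hsum', hG, hlen]
    · rw [if_neg hc]
      have halleq := all_eq_of_not_distinct hc
      match a, hpos, halleq with
      | [], _, _ => simp [G_nil]
      | v :: t, hpos, halleq =>
        have hrep : v :: t = List.replicate (v :: t).length v :=
          List.eq_replicate_iff.mpr ⟨rfl, fun b hb => halleq b hb v List.mem_cons_self⟩
        have hv0 : 0 < v := hpos v List.mem_cons_self
        conv_lhs => rw [hrep]
        rw [sum_replicate_int]
        congr 1
        conv_rhs => rw [hrep]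
        rw [show (v :: t).length = t.length + 1 from rfl]
        exact (G_replicate_pos hv0 t.length).symm

-- ===== VERDICT (by name: the statement is the Claim_ definition above) =====
theorem solution_spec : Claim_equal_solution := by
  intro a _ hpre
  unfold Spec_solution
  by_cases h1 : a.length = 1
  · simp [solution, solution_alt, h1]
  · rcases hpre with hlen | hposall | heq
    · have h0 : a.length = 0 := by omega
      rw [List.length_eq_zero_iff.mp h0]
      decide
    · -- positive case: both sides are length * gcd of the list
      have hsum0 : (0 : Int) ≤ a.sum :=
        le_trans (Int.natCast_nonneg a.length) (length_le_sum a hposall)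
      have hfuel : a.sum ≤ ((a.sum.toNat + 1 : Nat) : Int) := by omega
      have hA := loopA_spec (a.sum.toNat + 1) a hposall hfuel
      have hB : a.foldl (fun g x => gcdAux g x) 0 = G a := by
        rw [foldl_gcdAux_eq a 0 le_rfl (fun x hx => (hposall x hx).le), gcd_zero_left]
        exact Int.normalize_of_nonneg (G_nonneg a)
      simp only [solution, solution_alt, if_neg h1]
      rw [hA, hB]
    · -- constant case: the loop condition is false immediately
      match a, h1, heq with
      | [], _, _ => decide
      | v :: t, h1, heq =>
        have heq' : ∀ x ∈ v :: t, x = v := by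
          intro x hx
          have := heq x hx
          simpa using this
        have hrep : v :: t = List.replicate (v :: t).length v :=
          List.eq_replicate_iff.mpr ⟨rfl, fun b hb => heq' b hb⟩
        have hnd : ¬ 1 < (PySem.Set.ofList (v :: t)).length := by
          intro hgt
          obtain ⟨u, hu, w, hw, huw⟩ := exists_two_distinct hgt
          exact huw ((heq' u hu).trans (heq' w hw).symm)
        have hloop : loopA ((v :: t).sum.toNat + 1) (v :: t) = (v :: t) := by
          show (if 1 < (PySem.Set.ofList (v :: t)).length then
            loopA ((v :: t).sum.toNat) (stepA (v :: t)) else (v :: t)) = (v :: t)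
          rw [if_neg hnd]
        have hfold : (v :: t).foldl (fun g x => gcdAux g x) 0 = v := by
          conv_lhs => rw [hrep]
          rw [show (v :: t).length = t.length + 1 from rfl, List.replicate_succ]
          simp only [List.foldl_cons, gcdAux_zero_left]
          exact foldl_gcdAux_replicate v t.length
        simp only [solution, solution_alt, if_neg h1]
        rw [hloop, hfold]
        conv_lhs => rw [hrep]
        rw [sum_replicate_int]
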